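-- pv_equiv track=rewrite | github.com/GarryGaGarry/screen_object_maker | helpers/text_finder.py | _group_boxes_for_merging
-- ===== SOURCE A (Python) =====
-- from operator import itemgetter
--
-- def _group_boxes_for_merging(boxes_group, distance=80):
--     groups_of_boxes_for_merge = []
--     for group_name, boxes in boxes_group:
--         boxes_list = list(boxes)
--
--         # Сортируем по top x
--         boxes_list.sort(key=itemgetter(0))
--         boxes_for_merge = [boxes_list[0]]
--         for previous_index, box in enumerate(boxes_list[1:]):
--             previous_box = boxes_list[previous_index]
--             finish_x_previous_box = previous_box[2]     # bot x
--             start_x_box = box[0]    # top x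
--
--             if (finish_x_previous_box >= start_x_box) or ((start_x_box - finish_x_previous_box) <= distance):
--                 # Если координаты накладываются на предыдущими координатами или находятся не далеко от них
--                 # то добавляем координаты в группу для слияния
--                 boxes_for_merge.append(box)
--             else:
--                 # Иначе создаем новую группу для слияния
--                 groups_of_boxes_for_merge.append(boxes_for_merge)
--                 boxes_for_merge = [box]
--         groups_of_boxes_for_merge.append(boxes_for_merge)
--     return groups_of_boxes_for_merge
-- ===== SOURCE B (Python) =====
-- from operator import itemgetter
--
-- def _group_boxes_for_merging(boxes_group, distance=80):
--     result = []
--     for _group_name, boxes in boxes_group: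
--         bl = sorted(boxes, key=itemgetter(0))
--         splits = [i + 1
--                   for i, (prev, cur) in enumerate(zip(bl, bl[1:]))
--                   if not (prev[2] >= cur[0] or (cur[0] - prev[2]) <= distance)]
--         start = 0
--         for stop in splits + [len(bl)]:
--             result.append(bl[start:stop])
--             start = stop
--     return result
-- ===== Notes on version B (the rewrite author's own statement) =====
-- stated objective: alternative
-- what changed: A grows clusters in one stateful loop (current cluster list + finished-groups accumulator, appending box by box); B instead first computes the list of split indices between adjacent sorted boxes and then slices the sorted list at those indices; Pre_ excludes inputs with an empty box list in some group, on which A raises IndexError at boxes_list[0] (B returns an empty cluster there).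
import Mathlib
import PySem

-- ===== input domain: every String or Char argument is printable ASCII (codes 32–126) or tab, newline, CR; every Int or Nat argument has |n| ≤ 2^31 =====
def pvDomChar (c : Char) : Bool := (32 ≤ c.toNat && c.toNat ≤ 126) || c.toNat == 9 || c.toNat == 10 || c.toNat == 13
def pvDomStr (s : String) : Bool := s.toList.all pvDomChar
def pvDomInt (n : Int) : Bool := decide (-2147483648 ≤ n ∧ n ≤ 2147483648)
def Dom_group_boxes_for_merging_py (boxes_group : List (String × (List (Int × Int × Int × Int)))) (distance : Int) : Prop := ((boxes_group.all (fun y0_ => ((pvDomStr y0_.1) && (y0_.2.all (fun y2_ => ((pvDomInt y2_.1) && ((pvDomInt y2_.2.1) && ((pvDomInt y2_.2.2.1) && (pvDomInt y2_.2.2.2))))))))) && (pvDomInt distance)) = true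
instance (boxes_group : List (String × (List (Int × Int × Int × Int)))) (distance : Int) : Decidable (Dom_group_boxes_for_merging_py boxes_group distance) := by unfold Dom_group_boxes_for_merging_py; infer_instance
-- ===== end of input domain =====

-- B is an alternative decomposition: split indices between adjacent sorted boxes first, then
-- slices of the sorted list, instead of A's one stateful cluster-growing loop (return values
-- only; neither version mutates its argument).

-- ===== PORT A =====
-- one step of A's inner loop over enumerate(boxes_list[1:]); state = (groups_of_boxes_for_merge, boxes_for_merge)
def pvStepA (distance : Int) (boxes_list : List (Int × Int × Int × Int))
    (st : List (List (Int × Int × Int × Int)) × List (Int × Int × Int × Int))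
    (pb : Int × (Int × Int × Int × Int)) :
    List (List (Int × Int × Int × Int)) × List (Int × Int × Int × Int) :=
  let previous_box := PySem.List.pyGetD boxes_list pb.1 (0, 0, 0, 0)  -- boxes_list[previous_index]; index always in range
  let finish_x_previous_box := previous_box.2.2.1
  let start_x_box := pb.2.1
  if finish_x_previous_box ≥ start_x_box ∨ (start_x_box - finish_x_previous_box) ≤ distance then
    (st.1, st.2 ++ [pb.2])
  else
    (st.1 ++ [st.2], [pb.2])

def group_boxes_for_merging_py (boxes_group : List (String × (List (Int × Int × Int × Int)))) (distance : Int) : List (List (Int × Int × Int × Int)) :=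
  boxes_group.foldl (fun groups_of_boxes_for_merge gb =>
    let boxes_list := PySem.List.sorted gb.2 (fun b => b.1) false
    match boxes_list with
    | [] => groups_of_boxes_for_merge  -- Python: boxes_list[0] raises IndexError (excluded by Pre_)
    | b0 :: _ =>
      let st := (PySem.List.enumerate (PySem.List.slice boxes_list (some 1) none) 0).foldl
        (pvStepA distance boxes_list) (groups_of_boxes_for_merge, [b0])
      st.1 ++ [st.2]) []

-- ===== PORT B =====
-- split indices: [i+1 for i,(prev,cur) in enumerate(zip(bl, bl[1:])) if not (...)]
def pvStepS (distance : Int) (acc : List Int) (p : Int × ((Int × Int × Int × Int) × (Int × Int × Int × Int))) : List Int :=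
  if ¬ (p.2.1.2.2.1 ≥ p.2.2.1 ∨ (p.2.2.1 - p.2.1.2.2.1) ≤ distance) then acc ++ [p.1 + 1]
  else acc

def pvSplitsB (distance : Int) (bl : List (Int × Int × Int × Int)) : List Int :=
  (PySem.List.enumerate (bl.zip (PySem.List.slice bl (some 1) none)) 0).foldl (pvStepS distance) []

-- one step of B's slicing loop; state = (result, start)
def pvCutB (bl : List (Int × Int × Int × Int))
    (st : List (List (Int × Int × Int × Int)) × Int) (stop : Int) :
    List (List (Int × Int × Int × Int)) × Int :=
  (st.1 ++ [PySem.List.slice bl (some st.2) (some stop)], stop)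

def group_boxes_for_merging_py_alt (boxes_group : List (String × (List (Int × Int × Int × Int)))) (distance : Int) : List (List (Int × Int × Int × Int)) :=
  boxes_group.foldl (fun result gb =>
    let bl := PySem.List.sorted gb.2 (fun b => b.1) false
    let splits := pvSplitsB distance bl
    ((splits ++ [(bl.length : Int)]).foldl (pvCutB bl) (result, 0)).1) []

-- ===== PRECONDITION & SPEC =====
-- Pre_ excludes inputs with an empty box list in some group: there Python A raises IndexError
-- on boxes_list[0] (B returns one empty cluster for such a group).
def Pre_group_boxes_for_merging_py (boxes_group : List (String × (List (Int × Int × Int × Int)))) (_distance : Int) : Prop :=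
  ∀ gb ∈ boxes_group, gb.2 ≠ []
instance (boxes_group : List (String × (List (Int × Int × Int × Int)))) (distance : Int) : Decidable (Pre_group_boxes_for_merging_py boxes_group distance) := by unfold Pre_group_boxes_for_merging_py; infer_instance
def pvWitness_group_boxes_for_merging_py : (List (String × (List (Int × Int × Int × Int)))) × Int :=
  ([("word", [(0, 0, 10, 5), (200, 0, 210, 5), (15, 1, 20, 6)])], 80)

def Spec_group_boxes_for_merging_py (boxes_group : List (String × (List (Int × Int × Int × Int)))) (distance : Int) (out : List (List (Int × Int × Int × Int))) : Prop := out = group_boxes_for_merging_py_alt boxes_group distance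
instance (boxes_group : List (String × (List (Int × Int × Int × Int)))) (distance : Int) (out : List (List (Int × Int × Int × Int))) : Decidable (Spec_group_boxes_for_merging_py boxes_group distance out) := by unfold Spec_group_boxes_for_merging_py; infer_instance

-- ===== CLAIM (what is proved, stated in full; the proofs are below) =====
def Claim_equal_group_boxes_for_merging_py : Prop := ∀ (boxes_group : List (String × (List (Int × Int × Int × Int)))) (distance : Int), Dom_group_boxes_for_merging_py boxes_group distance → Pre_group_boxes_for_merging_py boxes_group distance → Spec_group_boxes_for_merging_py boxes_group distance (group_boxes_for_merging_py boxes_group distance)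

-- ===== LEMMAS AND PROOFS =====

-- reference clustering: grp d p rest = (rest of p's cluster, clusters after it)
def pvGrp (d : Int) : (Int × Int × Int × Int) → List (Int × Int × Int × Int) →
    List (Int × Int × Int × Int) × List (List (Int × Int × Int × Int))
  | _, [] => ([], [])
  | p, c :: rest =>
    let r := pvGrp d c rest
    if p.2.2.1 ≥ c.1 ∨ (c.1 - p.2.2.1) ≤ d then (c :: r.1, r.2) else ([], (c :: r.1) :: r.2)

-- reference split indices
def pvBreaks (d : Int) : Int → (Int × Int × Int × Int) → List (Int × Int × Int × Int) → List Int
  | _, _, [] => []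
  | n, p, c :: rest =>
    if p.2.2.1 ≥ c.1 ∨ (c.1 - p.2.2.1) ≤ d then pvBreaks d (n + 1) c rest
    else (n + 1) :: pvBreaks d (n + 1) c rest

theorem pvDrop_succ {α : Type} (bl : List α) (n : Nat) (p c : α) (tl : List α)
    (h : bl.drop n = p :: c :: tl) : bl.drop (n + 1) = c :: tl := by
  rw [← List.tail_drop, h]; rfl

theorem pvGetD_of_drop {α : Type} (bl : List α) (n : Nat) (p : α) (tl : List α) (d : α)
    (h : bl.drop n = p :: tl) : PySem.List.pyGetD bl (n : Int) d = p := by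
  rw [PySem.List.pyGetD_natCast]
  have h1 : (List.drop n bl)[0]? = some p := by rw [h]; rfl
  rw [List.getElem?_drop] at h1
  simp only [Nat.add_zero] at h1
  simp [List.getD, h1]

theorem pvA_loop (d : Int) (bl : List (Int × Int × Int × Int)) :
    ∀ (rest : List (Int × Int × Int × Int)) (p : Int × Int × Int × Int) (n : Nat)
      (acc : List (List (Int × Int × Int × Int))) (merge : List (Int × Int × Int × Int)),
    bl.drop n = p :: rest →
    ((PySem.List.enumerate rest (n : Int)).foldl (pvStepA d bl) (acc, merge)).1
      ++ [((PySem.List.enumerate rest (n : Int)).foldl (pvStepA d bl) (acc, merge)).2]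
      = acc ++ (merge ++ (pvGrp d p rest).1) :: (pvGrp d p rest).2 := by
  intro rest
  induction rest with
  | nil => intro p n acc merge h; simp [PySem.List.enumerate, pvGrp]
  | cons c rest ih =>
    intro p n acc merge h
    have hdrop := pvDrop_succ bl n p c rest h
    rw [PySem.List.enumerate_cons]
    simp only [List.foldl_cons]
    rw [show ((n : Int) + 1) = ((n + 1 : Nat) : Int) by push_cast; ring]
    by_cases hc : p.2.2.1 ≥ c.1 ∨ (c.1 - p.2.2.1) ≤ d
    · have hstep : pvStepA d bl (acc, merge) ((n : Int), c) = (acc, merge ++ [c]) := by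
        simp only [pvStepA]; rw [pvGetD_of_drop bl n p (c :: rest) _ h, if_pos hc]
      rw [hstep, ih c (n + 1) acc (merge ++ [c]) hdrop]
      simp only [pvGrp]
      rw [if_pos hc]
      simp
    · have hstep : pvStepA d bl (acc, merge) ((n : Int), c) = (acc ++ [merge], [c]) := by
        simp only [pvStepA]; rw [pvGetD_of_drop bl n p (c :: rest) _ h, if_neg hc]
      rw [hstep, ih c (n + 1) (acc ++ [merge]) [c] hdrop]
      simp only [pvGrp]
      rw [if_neg hc]
      simp

theorem pvSplits_loop (d : Int) :
    ∀ (rest : List (Int × Int × Int × Int)) (p : Int × Int × Int × Int) (n : Int)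
      (acc : List Int),
    (PySem.List.enumerate ((p :: rest).zip rest) n).foldl (pvStepS d) acc
      = acc ++ pvBreaks d n p rest := by
  intro rest
  induction rest with
  | nil => intro p n acc; simp [pvBreaks]
  | cons c rest ih =>
    intro p n acc
    simp only [List.zip_cons_cons, PySem.List.enumerate_cons, List.foldl_cons]
    by_cases hc : p.2.2.1 ≥ c.1 ∨ (c.1 - p.2.2.1) ≤ d
    · have hstep : pvStepS d acc (n, (p, c)) = acc := by
        simp only [pvStepS]; rw [if_neg (not_not_intro hc)]
      rw [hstep, ih c (n + 1) acc]
      simp only [pvBreaks]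
      rw [if_pos hc]
    · have hstep : pvStepS d acc (n, (p, c)) = acc ++ [n + 1] := by
        simp only [pvStepS]; rw [if_pos hc]
      rw [hstep, ih c (n + 1) (acc ++ [n + 1])]
      simp only [pvBreaks]
      rw [if_neg hc]
      simp

theorem pvCut_res (bl : List (Int × Int × Int × Int)) :
    ∀ (stops : List Int) (r : List (List (Int × Int × Int × Int))) (s : Int),
    (stops.foldl (pvCutB bl) (r, s)).1 = r ++ (stops.foldl (pvCutB bl) ([], s)).1 := by
  intro stops
  induction stops with
  | nil => intro r s; simp
  | cons t stops ih =>
    intro r s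
    simp only [List.foldl_cons, pvCutB]
    rw [ih (r ++ _) t, ih ([] ++ _) t]
    simp

theorem pvBreaks_ge (d : Int) :
    ∀ (rest : List (Int × Int × Int × Int)) (p : Int × Int × Int × Int) (n : Int)
      (s : Int), s ∈ pvBreaks d n p rest → n + 1 ≤ s := by
  intro rest
  induction rest with
  | nil => intro p n s h; simp [pvBreaks] at h
  | cons c rest ih =>
    intro p n s h
    unfold pvBreaks at h
    by_cases hc : p.2.2.1 ≥ c.1 ∨ (c.1 - p.2.2.1) ≤ d
    · rw [if_pos hc] at h
      have := ih c (n + 1) s h; omega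
    · rw [if_neg hc] at h
      rcases List.mem_cons.mp h with h | h
      · omega
      · have := ih c (n + 1) s h; omega

-- slice bl n s = p :: slice bl (n+1) s when drop n bl starts with p and n+1 ≤ s
theorem pvSlice_head (bl : List (Int × Int × Int × Int)) (n : Nat)
    (p : Int × Int × Int × Int) (tl : List (Int × Int × Int × Int)) (s : Int)
    (h : bl.drop n = p :: tl) (hs : (n : Int) + 1 ≤ s) :
    PySem.List.slice bl (some (n : Int)) (some s) =
      p :: PySem.List.slice bl (some ((n : Int) + 1)) (some s) := by
  have h0n : (0 : Int) ≤ (n : Int) := by positivity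
  have h0s : (0 : Int) ≤ s := by omega
  rw [PySem.List.slice_toNat bl h0n h0s]
  rw [show ((n : Int) + 1) = ((n + 1 : Nat) : Int) by push_cast; ring]
  rw [PySem.List.slice_toNat bl (by positivity) h0s]
  have hdrop : bl.drop (n + 1) = tl := by rw [← List.tail_drop, h]; rfl
  simp only [Int.toNat_natCast]
  rw [h, hdrop]
  have hge : n + 1 ≤ s.toNat := by omega
  rw [show s.toNat - n = (s.toNat - (n + 1)) + 1 by omega]
  simp [List.take_succ_cons]

theorem pvCut_loop (d : Int) (bl : List (Int × Int × Int × Int)) :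
    ∀ (rest : List (Int × Int × Int × Int)) (p : Int × Int × Int × Int) (n : Nat)
      (res : List (List (Int × Int × Int × Int))),
    bl.drop n = p :: rest →
    ((pvBreaks d (n : Int) p rest ++ [(bl.length : Int)]).foldl (pvCutB bl) (res, (n : Int))).1
      = res ++ (p :: (pvGrp d p rest).1) :: (pvGrp d p rest).2 := by
  intro rest
  induction rest with
  | nil =>
    intro p n res h
    have hlen : bl.length = n + 1 := by
      have := congrArg List.length h
      simp at this; omega
    simp only [pvBreaks, List.nil_append, List.foldl_cons, List.foldl_nil, pvCutB]
    rw [hlen]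
    rw [show ((n + 1 : Nat) : Int) = (n : Int) + ((1 : Nat) : Int) by push_cast; ring]
    rw [PySem.List.slice_natCast_add bl n 1, h]
    simp [pvGrp]
  | cons c rest ih =>
    intro p n res h
    have hdrop := pvDrop_succ bl n p c rest h
    have hlen : (n : Int) + 2 ≤ (bl.length : Int) := by
      have := congrArg List.length hdrop
      simp at this; omega
    unfold pvBreaks
    by_cases hc : p.2.2.1 ≥ c.1 ∨ (c.1 - p.2.2.1) ≤ d
    · rw [if_pos hc]
      have hIH := ih c (n + 1) ([] : List (List (Int × Int × Int × Int))) hdrop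
      rw [show ((n + 1 : Nat) : Int) = (n : Int) + 1 by push_cast; ring] at hIH
      rcases hL : pvBreaks d ((n : Int) + 1) c rest ++ [(bl.length : Int)] with _ | ⟨s, L'⟩
      · exact absurd hL (by simp)
      have hs : (n : Int) + 1 ≤ s := by
        rcases List.mem_append.mp (hL ▸ List.mem_cons_self) with hm | hm
        · have := pvBreaks_ge d rest c ((n : Int) + 1) s hm; omega
        · simp at hm; omega
      rw [hL] at hIH
      simp only [List.foldl_cons, pvCutB] at hIH
      simp only [List.foldl_cons, pvCutB]
      rw [pvCut_res bl L' ([] ++ [PySem.List.slice bl (some ((n : Int) + 1)) (some s)]) s] at hIH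
      rw [pvCut_res bl L' (res ++ [PySem.List.slice bl (some (n : Int)) (some s)]) s]
      rw [pvSlice_head bl n p (c :: rest) s h hs]
      simp only [List.nil_append, List.singleton_append, List.cons.injEq] at hIH
      simp only [pvGrp]
      rw [if_pos hc]
      rw [hIH.1, hIH.2]
      simp
    · rw [if_neg hc]
      simp only [List.cons_append, List.foldl_cons, pvCutB]
      have hsl : PySem.List.slice bl (some (n : Int)) (some ((n : Int) + 1)) = [p] := by
        rw [show ((n : Int) + 1) = ((n : Nat) : Int) + ((1 : Nat) : Int) by push_cast; ring]
        rw [PySem.List.slice_natCast_add bl n 1, h]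
        rfl
      rw [hsl]
      rw [show ((n : Int) + 1) = ((n + 1 : Nat) : Int) by push_cast; ring]
      rw [ih c (n + 1) (res ++ [[p]]) hdrop]
      simp only [pvGrp]
      rw [if_neg hc]
      simp

-- per-group equality on a nonempty sorted list
theorem pvGroup_eq (d : Int) (bl : List (Int × Int × Int × Int))
    (b0 : Int × Int × Int × Int) (tl : List (Int × Int × Int × Int))
    (hbl : bl = b0 :: tl) (acc : List (List (Int × Int × Int × Int))) :
    ((PySem.List.enumerate (PySem.List.slice bl (some 1) none) 0).foldl
        (pvStepA d bl) (acc, [b0])).1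
      ++ [((PySem.List.enumerate (PySem.List.slice bl (some 1) none) 0).foldl
        (pvStepA d bl) (acc, [b0])).2]
      = ((pvSplitsB d bl ++ [(bl.length : Int)]).foldl (pvCutB bl) (acc, 0)).1 := by
  have htail : PySem.List.slice bl (some 1) none = tl := by
    rw [PySem.List.slice_from_one, hbl]; rfl
  have hdrop0 : bl.drop 0 = b0 :: tl := by simpa using hbl
  have hA := pvA_loop d bl tl b0 0 acc [b0] hdrop0
  simp only [Int.natCast_zero] at hA
  rw [htail, hA]
  have hsplits : pvSplitsB d bl = pvBreaks d 0 b0 tl := by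
    unfold pvSplitsB
    rw [htail, hbl]
    simpa using pvSplits_loop d tl b0 0 []
  rw [hsplits]
  have hB := pvCut_loop d bl tl b0 0 acc hdrop0
  simp only [Int.natCast_zero] at hB
  rw [hB]
  simp

theorem pvTop (d : Int) :
    ∀ (bg : List (String × (List (Int × Int × Int × Int)))),
    (∀ gb ∈ bg, gb.2 ≠ []) →
    ∀ (acc : List (List (Int × Int × Int × Int))),
    bg.foldl (fun groups_of_boxes_for_merge gb =>
      let boxes_list := PySem.List.sorted gb.2 (fun b => b.1) false
      match boxes_list with
      | [] => groups_of_boxes_for_merge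
      | b0 :: _ =>
        let st := (PySem.List.enumerate (PySem.List.slice boxes_list (some 1) none) 0).foldl
          (pvStepA d boxes_list) (groups_of_boxes_for_merge, [b0])
        st.1 ++ [st.2]) acc
    = bg.foldl (fun result gb =>
      let bl := PySem.List.sorted gb.2 (fun b => b.1) false
      let splits := pvSplitsB d bl
      ((splits ++ [(bl.length : Int)]).foldl (pvCutB bl) (result, 0)).1) acc := by
  intro bg
  induction bg with
  | nil => intro _ acc; rfl
  | cons gb bg ih =>
    intro hpre acc
    have hne : gb.2 ≠ [] := hpre gb List.mem_cons_self
    have hsne : PySem.List.sorted gb.2 (fun b => b.1) false ≠ [] := by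
      rw [Ne, PySem.List.sorted_eq_nil_iff]; exact hne
    rcases hbl : PySem.List.sorted gb.2 (fun b => b.1) false with _ | ⟨b0, tl⟩
    · exact absurd hbl hsne
    simp only [List.foldl_cons, hbl]
    rw [pvGroup_eq d (b0 :: tl) b0 tl rfl acc]
    exact ih (fun g hg => hpre g (List.mem_cons_of_mem gb hg)) _

-- ===== VERDICT (by name: the statement is the Claim_ definition above) =====
theorem group_boxes_for_merging_py_spec : Claim_equal_group_boxes_for_merging_py := by
  intro bg d _ hpre
  unfold Spec_group_boxes_for_merging_py group_boxes_for_merging_py group_boxes_for_merging_py_alt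
  exact pvTop d bg hpre []
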